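-- pv_equiv track=rewrite | github.com/ojayballer/OPERATING-SYSTEMS-CSC-314- | Disk scheduling/Shortest Job Next(SJN).py | SJN
-- ===== SOURCE A (Python) =====
-- def SJN(jobs):
--     jobs.sort()
--     wait_time=[0]*len(jobs); total_wait=0#counter
--     turnaround=[0]*len(jobs)
--     for i in range(1,len(jobs)): #the wait time of the first job is always 0
--         #current wait time=previous wait time +previous job's length
--         wait_time[i]=wait_time[i-1]+jobs[i-1]
--     for i in range(len(jobs)):
--         #to store the total wait time
--         turnaround[i]=wait_time[i]+jobs[i]
--     return turnaround
-- ===== SOURCE B (Python) =====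
-- def SJN(jobs):
--     jobs.sort()
--     remaining = sum(jobs)
--     out = []
--     for j in reversed(jobs):
--         out.append(remaining)
--         remaining -= j
--     out.reverse()
--     return out
-- ===== Notes on version B (the rewrite author's own statement) =====
-- stated objective: alternative
-- what changed: Builds the result back-to-front: starts from the grand total sum(jobs), walks the sorted jobs in reverse subtracting each job to get every turnaround, then reverses; A instead runs two forward index loops building a wait_time prefix array and adding it to each job.
import Mathlib
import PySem

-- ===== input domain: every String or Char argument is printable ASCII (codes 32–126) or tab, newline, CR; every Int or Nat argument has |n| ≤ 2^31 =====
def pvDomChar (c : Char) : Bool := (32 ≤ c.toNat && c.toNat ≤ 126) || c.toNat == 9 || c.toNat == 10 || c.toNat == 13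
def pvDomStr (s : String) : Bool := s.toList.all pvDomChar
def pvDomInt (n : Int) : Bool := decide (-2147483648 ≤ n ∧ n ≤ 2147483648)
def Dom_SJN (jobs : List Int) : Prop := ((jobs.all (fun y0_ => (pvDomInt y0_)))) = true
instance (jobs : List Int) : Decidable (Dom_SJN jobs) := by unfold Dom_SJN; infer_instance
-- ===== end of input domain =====

-- B builds the result back-to-front: it starts from the grand total sum of the sorted jobs and
-- walks them in reverse, subtracting each job, then reverses (alternative decomposition; A's two
-- forward index loops and its wait_time array disappear). Both A and B sort `jobs` in place; the
-- equivalence proved here is about the return value.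

-- ===== PORT A =====
def SJN (jobs : List Int) : List Int :=
  let s := PySem.List.sorted jobs (fun x => x) false
  let n : Int := (s.length : Int)
  let wait := (PySem.List.pyRange 1 n 1).foldl
    (fun w i =>
      PySem.List.pySetD w i (PySem.List.pyGetD w (i - 1) 0 + PySem.List.pyGetD s (i - 1) 0))
    (List.replicate s.length (0 : Int))
  (PySem.List.pyRange 0 n 1).foldl
    (fun t i =>
      PySem.List.pySetD t i (PySem.List.pyGetD wait i 0 + PySem.List.pyGetD s i 0))
    (List.replicate s.length (0 : Int))

-- ===== PORT B =====
def SJN_alt (jobs : List Int) : List Int :=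
  let s := PySem.List.sorted jobs (fun x => x) false
  ((s.reverse.foldl (fun (acc : Int × List Int) j => (acc.1 - j, acc.2 ++ [acc.1]))
      (s.sum, ([] : List Int))).2).reverse

-- ===== PRECONDITION & SPEC =====
def Spec_SJN (jobs : List Int) (out : List Int) : Prop := out = SJN_alt jobs
instance (jobs : List Int) (out : List Int) : Decidable (Spec_SJN jobs out) := by unfold Spec_SJN; infer_instance

-- ===== CLAIM (what is proved, stated in full; the proofs are below) =====
def Claim_equal_SJN : Prop := ∀ (jobs : List Int), Dom_SJN jobs → Spec_SJN jobs (SJN jobs)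

-- ===== LEMMAS AND PROOFS =====

-- prefix-sum list: pfxList t [x1,…,xm] = [t+x1, t+x1+x2, …]
def pfxList (t : Int) : List Int → List Int
  | [] => []
  | x :: xs => (t + x) :: pfxList (t + x) xs

-- suffix-total list: sfxList t [x1,…,xm] = [t, t-x1, t-x1-x2, …] (m values)
def sfxList (t : Int) : List Int → List Int
  | [] => []
  | x :: xs => t :: sfxList (t - x) xs

theorem length_pfxList (l : List Int) : ∀ t, (pfxList t l).length = l.length := by
  induction l with
  | nil => intro t; rfl
  | cons x xs ih => intro t; simp [pfxList, ih]

theorem getD_pfxList (l : List Int) : ∀ (t : Int) (j : Nat), j < l.length →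
    (pfxList t l).getD j 0 = t + (l.take (j + 1)).sum := by
  induction l with
  | nil => intro t j h; simp at h
  | cons x xs ih =>
    intro t j h
    cases j with
    | zero => simp [pfxList]
    | succ j =>
      simp only [pfxList, List.getD_cons_succ, List.take_succ_cons, List.sum_cons]
      rw [ih (t + x) j (by simpa using h)]
      ring

theorem sfxList_append (a b : List Int) : ∀ (t : Int),
    sfxList t (a ++ b) = sfxList t a ++ sfxList (t - a.sum) b := by
  induction a with
  | nil => intro t; simp [sfxList]
  | cons x xs ih =>
    intro t
    simp only [List.cons_append, sfxList, List.sum_cons, ih (t - x)]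
    have : t - x - xs.sum = t - (x + xs.sum) := by ring
    rw [this]

theorem reverse_pfxList (l : List Int) : ∀ (t : Int),
    (pfxList t l).reverse = sfxList (t + l.sum) l.reverse := by
  induction l with
  | nil => intro t; rfl
  | cons x xs ih =>
    intro t
    simp only [pfxList, List.reverse_cons, List.sum_cons, sfxList_append, ih (t + x), sfxList]
    have h1 : t + (x + xs.sum) - xs.reverse.sum = t + x := by
      have : xs.reverse.sum = xs.sum := List.sum_reverse xs
      rw [this]; ring
    rw [h1]
    congr 1
    ring_nf

theorem revFold (l : List Int) : ∀ (t : Int) (out : List Int),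
    (l.foldl (fun (acc : Int × List Int) j => (acc.1 - j, acc.2 ++ [acc.1])) (t, out)).2
    = out ++ sfxList t l := by
  induction l with
  | nil => intro t out; simp [sfxList]
  | cons x xs ih =>
    intro t out
    simp only [List.foldl_cons, sfxList]
    rw [ih (t - x) (out ++ [t])]
    simp

theorem length_foldSet (f : List Int → Int → Int) :
    ∀ (l : List Int) (w : List Int),
      (l.foldl (fun t i => PySem.List.pySetD t i (f t i)) w).length = w.length := by
  intro l
  induction l with
  | nil => intro w; rfl
  | cons x xs ih => intro w; simp [ih, PySem.List.length_pySetD]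

theorem getD_set_eq (w : List Int) (k j : Nat) (v : Int) (hk : k < w.length) :
    (w.set k v).getD j 0 = if j = k then v else w.getD j 0 := by
  by_cases h : j = k
  · rw [if_pos h, h]
    simp only [List.getD, List.getElem?_set_self hk, Option.getD_some]
  · rw [if_neg h]
    simp only [List.getD, List.getElem?_set_ne (fun he => h he.symm)]

theorem getD_replicate_zero (n j : Nat) : (List.replicate n (0 : Int)).getD j 0 = 0 := by
  simp only [List.getD, List.getElem?_replicate]
  split_ifs
  · rfl
  · rfl

theorem sum_take_succ (s : List Int) (j : Nat) (h : j < s.length) :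
    (s.take (j + 1)).sum = (s.take j).sum + s[j] :=
  List.sum_take_succ s j h

-- the wait_time loop: after processing range(1, k), index j holds the prefix sum of the
-- first j sorted jobs if j < k (and j < n), else still 0
theorem waitChar (s : List Int) : ∀ (k : Nat), k ≤ s.length → ∀ (j : Nat),
    ((PySem.List.pyRange 1 (k : Int) 1).foldl
      (fun w i =>
        PySem.List.pySetD w i (PySem.List.pyGetD w (i - 1) 0 + PySem.List.pyGetD s (i - 1) 0))
      (List.replicate s.length (0 : Int))).getD j 0
    = if j < k ∧ j < s.length then (s.take j).sum else 0 := by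
  intro k
  induction k with
  | zero =>
    intro _ j
    rw [PySem.List.pyRange_one_eq_nil (by omega)]
    simp only [List.foldl_nil, getD_replicate_zero]
    split_ifs with h <;> [omega; rfl]
  | succ k ih =>
    intro hk j
    by_cases hk1 : k = 0
    · subst hk1
      rw [PySem.List.pyRange_one_eq_nil (by omega)]
      simp only [List.foldl_nil, getD_replicate_zero]
      split_ifs with h1
      · obtain ⟨h1a, _⟩ := h1
        interval_cases j
        simp
      · rfl
    · have hkn : k < s.length := by omega
      have hsplit : PySem.List.pyRange 1 ((k + 1 : Nat) : Int) 1
          = PySem.List.pyRange 1 (k : Int) 1 ++ [(k : Int)] := by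
        have : ((k + 1 : Nat) : Int) = (k : Int) + 1 := by push_cast; ring
        rw [this, PySem.List.pyRange_one_succ_right (by omega)]
      rw [hsplit, List.foldl_append]
      simp only [List.foldl_cons, List.foldl_nil]
      have hlen : ((PySem.List.pyRange 1 (k : Int) 1).foldl
          (fun w i =>
            PySem.List.pySetD w i (PySem.List.pyGetD w (i - 1) 0 + PySem.List.pyGetD s (i - 1) 0))
          (List.replicate s.length (0 : Int))).length = s.length := by
        rw [length_foldSet (fun w i => PySem.List.pyGetD w (i - 1) 0 + PySem.List.pyGetD s (i - 1) 0)]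
        simp
      have hcast : ((k : Int) - 1) = ((k - 1 : Nat) : Int) := by omega
      rw [hcast, PySem.List.pyGetD_natCast, PySem.List.pyGetD_natCast, PySem.List.pySetD_natCast]
      rw [getD_set_eq _ _ _ _ (by omega)]
      rw [ih (by omega) (k - 1)]
      have hsk : s.getD (k - 1) 0 = s[k - 1]'(by omega) := List.getD_eq_getElem s 0 (by omega)
      by_cases hj : j = k
      · have htake : (s.take k).sum = (s.take (k - 1)).sum + s[k - 1]'(by omega) := by
          have hk' : k - 1 + 1 = k := by omega
          have h2 := sum_take_succ s (k - 1) (by omega)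
          rwa [hk'] at h2
        rw [if_pos hj, if_pos (by omega : j < k + 1 ∧ j < s.length), hj,
          if_pos (⟨by omega, by omega⟩ : k - 1 < k ∧ k - 1 < s.length), hsk, htake]
      · rw [if_neg hj, ih (by omega) j]
        split_ifs with h1 h2 <;> simp_all <;> omega

-- generic second loop: for i in range(k): t[i] = g(i)
theorem foldSetChar (g : Int → Int) : ∀ (k : Nat) (w : List Int), k ≤ w.length → ∀ (j : Nat),
    ((PySem.List.pyRange 0 (k : Int) 1).foldl (fun t i => PySem.List.pySetD t i (g i)) w).getD j 0
    = if j < k then g (j : Int) else w.getD j 0 := by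
  intro k
  induction k with
  | zero =>
    intro w _ j
    rw [PySem.List.pyRange_one_eq_nil (by omega)]
    simp
  | succ k ih =>
    intro w hk j
    have hsplit : PySem.List.pyRange 0 ((k + 1 : Nat) : Int) 1
        = PySem.List.pyRange 0 (k : Int) 1 ++ [(k : Int)] := by
      have : ((k + 1 : Nat) : Int) = (k : Int) + 1 := by push_cast; ring
      rw [this, PySem.List.pyRange_one_succ_right (by omega)]
    rw [hsplit, List.foldl_append]
    simp only [List.foldl_cons, List.foldl_nil]
    have hlen : ((PySem.List.pyRange 0 (k : Int) 1).foldl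
        (fun t i => PySem.List.pySetD t i (g i)) w).length = w.length :=
      length_foldSet (fun _ i => g i) _ w
    rw [PySem.List.pySetD_natCast, getD_set_eq _ _ _ _ (by omega)]
    rw [ih w (by omega) j]
    split_ifs with h1 h2 h3 <;> simp_all <;> omega

theorem SJN_eq_pfx (jobs : List Int) :
    SJN jobs = pfxList 0 (PySem.List.sorted jobs (fun x => x) false) := by
  unfold SJN
  set s := PySem.List.sorted jobs (fun x => x) false with hs
  simp only
  apply List.ext_getElem
  · rw [show ((s.length : Int)) = ((s.length : Nat) : Int) from rfl]
    rw [length_foldSet, List.length_replicate, length_pfxList]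
  · intro j h1 h2
    have hjn : j < s.length := by rwa [length_pfxList] at h2
    rw [← List.getD_eq_getElem _ 0 h1, ← List.getD_eq_getElem _ 0 h2]
    rw [show ((s.length : Int)) = ((s.length : Nat) : Int) from rfl]
    rw [foldSetChar (fun i => PySem.List.pyGetD _ i 0 + PySem.List.pyGetD s i 0)
        s.length (List.replicate s.length 0) (by simp) j]
    rw [if_pos hjn]
    rw [PySem.List.pyGetD_natCast, PySem.List.pyGetD_natCast]
    rw [waitChar s s.length (le_refl _) j]
    rw [if_pos ⟨hjn, hjn⟩]
    rw [getD_pfxList s 0 j hjn]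
    have hsj : s.getD j 0 = s[j]'hjn := List.getD_eq_getElem s 0 hjn
    rw [hsj, sum_take_succ s j hjn]
    ring

theorem SJN_alt_eq_pfx (jobs : List Int) :
    SJN_alt jobs = pfxList 0 (PySem.List.sorted jobs (fun x => x) false) := by
  unfold SJN_alt
  set s := PySem.List.sorted jobs (fun x => x) false with hs
  simp only
  rw [revFold]
  simp only [List.nil_append]
  have h := reverse_pfxList s 0
  simp only [Int.zero_add] at h
  rw [← h, List.reverse_reverse]

-- ===== VERDICT (by name: the statement is the Claim_ definition above) =====
theorem SJN_spec : Claim_equal_SJN := by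
  intro jobs _
  unfold Spec_SJN
  rw [SJN_eq_pfx, SJN_alt_eq_pfx]
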